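-- pv_equiv track=rewrite | github.com/shaoboly/ql_copy_network | data_reading/wikipedia_read.py | refine_sentence
-- ===== SOURCE A (Python) =====
-- def refine_sentence(all_line):
--     total_length = 0
--     new_all_line = []
--     for line in all_line:
--         total_length += len(line.split())
--         if total_length > 512:
--             break
--         new_all_line.append(line)
--     return " ".join(new_all_line)
-- ===== SOURCE B (Python) =====
-- from itertools import accumulate
-- from bisect import bisect_right
--
--
-- def refine_sentence(all_line):
--     sums = list(accumulate(len(line.split()) for line in all_line))
--     k = bisect_right(sums, 512)
--     return " ".join(all_line[:k])
-- ===== Notes on version B (the rewrite author's own statement) =====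
-- stated objective: alternative
-- what changed: B precomputes the running prefix sums of per-line word counts and binary-searches (bisect_right) for the first position exceeding 512, then joins that prefix, instead of accumulating with an early break inside the loop.
import Mathlib
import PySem

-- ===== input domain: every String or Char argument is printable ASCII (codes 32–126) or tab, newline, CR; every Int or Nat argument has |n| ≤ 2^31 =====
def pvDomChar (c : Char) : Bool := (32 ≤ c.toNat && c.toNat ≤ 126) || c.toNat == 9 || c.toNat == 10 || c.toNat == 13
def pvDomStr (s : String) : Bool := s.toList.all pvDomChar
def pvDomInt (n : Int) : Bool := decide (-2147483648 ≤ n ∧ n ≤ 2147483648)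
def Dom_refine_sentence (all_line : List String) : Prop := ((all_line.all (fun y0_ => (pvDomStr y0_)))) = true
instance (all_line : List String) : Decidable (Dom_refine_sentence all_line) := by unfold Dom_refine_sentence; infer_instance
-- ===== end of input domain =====

-- B joins the prefix found by binary search over precomputed word-count prefix sums
-- instead of A's accumulate-and-break loop; objective: alternative (same cost, different algorithm).

-- number of words of a line: len(line.split())
def pvWc (l : String) : Int := ((PySem.Str.split₀ l).length : Int)

-- ===== PORT A =====
def refineLoop (total : Int) (acc : List String) : List String → List String
  | [] => acc
  | l :: rest =>
    let total' := total + pvWc l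
    if total' > 512 then acc else refineLoop total' (acc ++ [l]) rest

def refine_sentence (all_line : List String) : String :=
  PySem.Str.join " " (refineLoop 0 [] all_line)

-- ===== PORT B =====
-- itertools.accumulate of the word counts
def pvAccum (t : Int) : List Int → List Int
  | [] => []
  | c :: cs => (t + c) :: pvAccum (t + c) cs

-- bisect.bisect_right on the prefix-sum list
def pvBisect (s : List Int) (x : Int) (lo hi : Nat) : Nat :=
  if _h : lo < hi then
    let mid := (lo + hi) / 2
    if x < s.getD mid 0 then pvBisect s x lo mid else pvBisect s x (mid + 1) hi
  else lo
termination_by hi - lo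
decreasing_by all_goals omega

def refine_sentence_alt (all_line : List String) : String :=
  let sums := pvAccum 0 (all_line.map pvWc)
  let k := pvBisect sums 512 0 sums.length
  PySem.Str.join " " (all_line.take k)

-- ===== PRECONDITION & SPEC =====
def Spec_refine_sentence (all_line : List String) (out : String) : Prop := out = refine_sentence_alt all_line
instance (all_line : List String) (out : String) : Decidable (Spec_refine_sentence all_line out) := by unfold Spec_refine_sentence; infer_instance

-- ===== CLAIM (what is proved, stated in full; the proofs are below) =====
def Claim_equal_refine_sentence : Prop := ∀ (all_line : List String), Dom_refine_sentence all_line → Spec_refine_sentence all_line (refine_sentence all_line)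

-- ===== LEMMAS AND PROOFS =====

-- the number of lines A's loop keeps
def pvCut (t : Int) : List String → Nat
  | [] => 0
  | l :: ls => if t + pvWc l > 512 then 0 else pvCut (t + pvWc l) ls + 1

theorem refineLoop_eq (ls : List String) : ∀ (t : Int) (acc : List String),
    refineLoop t acc ls = acc ++ ls.take (pvCut t ls) := by
  induction ls with
  | nil => intro t acc; simp [refineLoop, pvCut]
  | cons l ls ih =>
    intro t acc
    simp only [refineLoop, pvCut]
    split
    · simp
    · simp [ih]

theorem pvWc_nonneg (l : String) : 0 ≤ pvWc l := by
  simp [pvWc]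

theorem pvAccum_length (cs : List Int) : ∀ t, (pvAccum t cs).length = cs.length := by
  induction cs with
  | nil => intro t; simp [pvAccum]
  | cons c cs ih => intro t; simp [pvAccum, ih]

theorem pvAccum_getD (cs : List Int) : ∀ (t : Int) (i : Nat), i < cs.length →
    (pvAccum t cs).getD i 0 = t + (cs.take (i + 1)).sum := by
  induction cs with
  | nil => intro t i h; simp at h
  | cons c cs ih =>
    intro t i h
    cases i with
    | zero => simp [pvAccum]
    | succ i =>
      simp only [pvAccum, List.getD_cons_succ, List.take_succ_cons, List.sum_cons]
      rw [ih (t + c) i (by simpa using h)]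
      ring

theorem sum_take_mono (cs : List Int) (h : ∀ c ∈ cs, 0 ≤ c) {i j : Nat} (hij : i ≤ j) :
    (cs.take i).sum ≤ (cs.take j).sum := by
  have hj : j = i + (j - i) := by omega
  calc (cs.take i).sum ≤ (cs.take i).sum + ((cs.drop i).take (j - i)).sum := by
        have : 0 ≤ ((cs.drop i).take (j - i)).sum :=
          List.sum_nonneg (fun c hc => h c (List.mem_of_mem_drop (List.mem_of_mem_take hc)))
        omega
    _ = (cs.take i ++ (cs.drop i).take (j - i)).sum := by rw [List.sum_append]
    _ = (cs.take j).sum := by rw [hj, List.take_add, Nat.add_sub_cancel_left]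

theorem pvAccum_mono (cs : List Int) (h : ∀ c ∈ cs, 0 ≤ c) (t : Int) {i j : Nat}
    (hij : i ≤ j) (hj : j < cs.length) :
    (pvAccum t cs).getD i 0 ≤ (pvAccum t cs).getD j 0 := by
  rw [pvAccum_getD cs t i (by omega), pvAccum_getD cs t j hj]
  have := sum_take_mono cs h (i := i + 1) (j := j + 1) (by omega)
  omega

-- pvCut characterization against the prefix sums
theorem pvCut_le (ls : List String) : ∀ t, pvCut t ls ≤ ls.length := by
  induction ls with
  | nil => intro t; simp [pvCut]
  | cons l ls ih =>
    intro t
    have := ih (t + pvWc l)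
    by_cases hgt : t + pvWc l > 512
    · simp [pvCut, hgt]
    · simp only [pvCut, if_neg hgt, List.length_cons]
      omega

theorem pvCut_lt (ls : List String) : ∀ (t : Int) (i : Nat), i < pvCut t ls →
    (pvAccum t (ls.map pvWc)).getD i 0 ≤ 512 := by
  induction ls with
  | nil => intro t i h; simp [pvCut] at h
  | cons l ls ih =>
    intro t i h
    simp only [pvCut] at h
    split at h
    · omega
    · rename_i hle
      cases i with
      | zero => simpa [pvAccum] using (by omega : ¬ t + pvWc l > 512 → t + pvWc l ≤ 512) hle
      | succ i =>
        simp only [List.map_cons, pvAccum, List.getD_cons_succ]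
        exact ih (t + pvWc l) i (by omega)

theorem pvCut_gt (ls : List String) : ∀ (t : Int), pvCut t ls < ls.length →
    512 < (pvAccum t (ls.map pvWc)).getD (pvCut t ls) 0 := by
  induction ls with
  | nil => intro t h; simp [pvCut] at h
  | cons l ls ih =>
    intro t h
    simp only [pvCut] at h ⊢
    split
    · rename_i hgt; simpa [pvAccum] using hgt
    · rename_i hle
      simp only [List.map_cons, pvAccum, List.getD_cons_succ]
      exact ih (t + pvWc l) (by rw [if_neg hle] at h; simp at h; omega)

-- pvBisect bounds and characterization
theorem pvBisect_le (s : List Int) (x : Int) : ∀ (lo hi : Nat), lo ≤ hi →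
    lo ≤ pvBisect s x lo hi ∧ pvBisect s x lo hi ≤ hi := by
  intro lo hi
  fun_induction pvBisect s x lo hi with
  | case1 lo hi h mid hlt ih =>
    intro _
    have := ih (by omega)
    omega
  | case2 lo hi h mid hlt ih =>
    intro _
    have := ih (by omega)
    omega
  | case3 lo hi h => intro _; omega

theorem pvBisect_inv (s : List Int) (x : Int)
    (mono : ∀ i j : Nat, i ≤ j → j < s.length → s.getD i 0 ≤ s.getD j 0) :
    ∀ (lo hi : Nat), lo ≤ hi → hi ≤ s.length →
    (∀ i, i < lo → s.getD i 0 ≤ x) →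
    (∀ i, hi ≤ i → i < s.length → x < s.getD i 0) →
    (∀ i, i < pvBisect s x lo hi → s.getD i 0 ≤ x) ∧
    (∀ i, pvBisect s x lo hi ≤ i → i < s.length → x < s.getD i 0) := by
  intro lo hi
  fun_induction pvBisect s x lo hi with
  | case1 lo hi h mid hlt ih =>
    intro _ hhi hlo hhi2
    refine ih (by omega) (by omega) hlo ?_
    intro i hmi hin
    exact lt_of_lt_of_le hlt (mono mid i hmi hin)
  | case2 lo hi h mid hlt ih =>
    intro _ hhi hlo hhi2
    refine ih (by omega) hhi ?_ hhi2
    intro i hi'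
    have hm : mid < s.length := by omega
    exact le_trans (mono i mid (by omega) hm) (by omega)
  | case3 lo hi h =>
    intro hle hhi hlo hhi2
    exact ⟨hlo, fun i h1 h2 => hhi2 i (by omega) h2⟩

theorem cut_eq_bisect (ls : List String) :
    pvBisect (pvAccum 0 (ls.map pvWc)) 512 0 (pvAccum 0 (ls.map pvWc)).length
      = pvCut 0 ls := by
  set s := pvAccum 0 (ls.map pvWc) with hs
  have hlen : s.length = ls.length := by rw [hs, pvAccum_length]; simp
  have hnn : ∀ c ∈ ls.map pvWc, 0 ≤ c := by
    intro c hc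
    rcases List.mem_map.1 hc with ⟨l, _, rfl⟩
    exact pvWc_nonneg l
  have mono : ∀ i j : Nat, i ≤ j → j < s.length → s.getD i 0 ≤ s.getD j 0 := by
    intro i j hij hj
    rw [hs]
    exact pvAccum_mono _ hnn 0 hij (by simpa [hs, pvAccum_length] using hj)
  obtain ⟨h1, h2⟩ := pvBisect_inv s 512 mono 0 s.length (by omega) le_rfl
    (by omega) (by omega)
  obtain ⟨_, hble⟩ := pvBisect_le s 512 0 s.length (by omega)
  set k := pvBisect s 512 0 s.length with hk
  have hcle : pvCut 0 ls ≤ ls.length := pvCut_le ls 0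
  rcases lt_trichotomy k (pvCut 0 ls) with hlt | heq | hgt
  · have h3 := pvCut_lt ls 0 k hlt
    rw [← hs] at h3
    have := h2 k le_rfl (by omega)
    omega
  · exact heq
  · have h3 := pvCut_gt ls 0 (by omega)
    rw [← hs] at h3
    have := h1 (pvCut 0 ls) hgt
    omega

-- ===== VERDICT (by name: the statement is the Claim_ definition above) =====
theorem refine_sentence_spec : Claim_equal_refine_sentence := by
  intro all_line _
  show PySem.Str.join " " (refineLoop 0 [] all_line)
      = PySem.Str.join " " (all_line.take
          (pvBisect (pvAccum 0 (all_line.map pvWc)) 512 0 (pvAccum 0 (all_line.map pvWc)).length))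
  rw [refineLoop_eq, cut_eq_bisect]
  simp
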